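-- pv_equiv track=rewrite | github.com/schmittydog/algo_expert | best_seat.py | bestSeat
-- ===== SOURCE A (Python) =====
-- def bestSeat(seats):
--     '''
--         Time: N
--         Space: 1
--     '''
--     right = 0
--     max_zeros = 0
--     cur_zeros = 0
--     for i in range(len(seats)):
--         if seats[i] == 1:
--             cur_zeros = 0
--         else:
--             cur_zeros += 1
--             if cur_zeros > max_zeros:
--                 max_zeros = cur_zeros
--                 right = i
--     if right == 0:
--         return -1
--     return right - max_zeros + 1 + (max_zeros-1)//2
-- ===== SOURCE B (Python) =====
-- def bestSeat(seats):
--     # Gather the maximal runs of empty seats as (start, length) pairs,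
--     # then take the first longest run and sit in its middle (left-biased).
--     runs = []
--     i = 0
--     n = len(seats)
--     while i < n:
--         if seats[i] == 1:
--             i += 1
--             continue
--         j = i
--         while j < n and seats[j] != 1:
--             j += 1
--         runs.append((i, j - i))
--         i = j
--     if not runs:
--         return -1
--     start, length = max(runs, key=lambda r: r[1])
--     return start + (length - 1) // 2
-- ===== Notes on version B (the rewrite author's own statement) =====
-- stated objective: alternative
-- what changed: Replaces A's single-pass per-element counter scan by a two-phase run decomposition: first build the list of maximal empty-seat runs as (start,length) pairs run-at-a-time, then pick the first longest run with max(key=length) and return its left middle.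
-- intended difference: On seat lists that start with an empty seat and have no two adjacent empty seats, A returns -1 (its right-end tracker stays at its 0 sentinel because the best run ends at index 0), while B returns 0; seat 0 is genuinely free there, so B's answer is the intended one. — e.g. on bestSeat([0]): A returns -1, B returns 0
import Mathlib
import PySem

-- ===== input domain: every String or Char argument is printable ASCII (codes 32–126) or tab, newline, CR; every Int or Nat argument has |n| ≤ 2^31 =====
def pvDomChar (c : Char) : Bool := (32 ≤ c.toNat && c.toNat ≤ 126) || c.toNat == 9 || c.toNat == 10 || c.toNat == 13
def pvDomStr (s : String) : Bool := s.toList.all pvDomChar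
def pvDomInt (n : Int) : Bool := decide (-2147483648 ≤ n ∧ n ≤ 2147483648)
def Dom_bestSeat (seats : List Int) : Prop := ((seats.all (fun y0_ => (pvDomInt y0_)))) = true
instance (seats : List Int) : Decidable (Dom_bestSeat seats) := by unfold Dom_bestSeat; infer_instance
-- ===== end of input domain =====

-- B rebuilds the answer from the list of maximal empty-seat runs (same O(n) cost); on lists whose
-- best run is the single seat at index 0, A returns -1 and B returns 0 (stated as D_ below).

-- ===== PORT A =====
-- A's for-loop over indices with state (right, max_zeros, cur_zeros); all three stay nonnegative in Python, kept as Nat.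
def bestSeatLoop : List Int → Nat → Nat × Nat × Nat → Nat × Nat × Nat
  | [], _, st => st
  | x :: t, i, (right, mx, cur) =>
    if x = 1 then bestSeatLoop t (i + 1) (right, mx, 0)
    else if cur + 1 > mx then bestSeatLoop t (i + 1) (i, cur + 1, cur + 1)
    else bestSeatLoop t (i + 1) (right, mx, cur + 1)

def bestSeat (seats : List Int) : Int :=
  let st := bestSeatLoop seats 0 (0, 0, 0)
  let right := st.1
  let mx := st.2.1
  if right = 0 then -1
  else (right : Int) - (mx : Int) + 1 + PySem.Int.floordiv ((mx : Int) - 1) 2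

-- ===== PORT B =====
-- `seats[j] != 1` in Source B's inner while
def notOne (y : Int) : Bool := y ≠ 1

-- phase 1 of Source B: the list of maximal empty-seat runs as (start, length) pairs, run-at-a-time
def zeroRuns : List Int → Nat → List (Nat × Nat)
  | [], _ => []
  | x :: t, i =>
    if x = 1 then zeroRuns t (i + 1)
    else
      (i, 1 + (t.takeWhile notOne).length) ::
        zeroRuns (t.drop (t.takeWhile notOne).length) (i + 1 + (t.takeWhile notOne).length)
termination_by l _ => l.length
decreasing_by all_goals (simp only [List.length_drop, List.length_cons]; omega)

-- phase 2 of Source B: max(runs, key=length) — the first run of maximal length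
def pickBest (runs : List (Nat × Nat)) : Option (Nat × Nat) :=
  runs.foldl (fun acc p =>
    match acc with
    | none => some p
    | some q => if p.2 > q.2 then some p else acc) none

def bestSeat_alt (seats : List Int) : Int :=
  match pickBest (zeroRuns seats 0) with
  | none => -1
  | some (s, n) => (s : Int) + (((n - 1) / 2 : Nat) : Int)

-- ===== PRECONDITION & SPEC =====
-- On seat lists that start with an empty seat and have no two adjacent empty seats, A returns -1
-- (its right-end tracker stays at its 0 sentinel because the best run ends at index 0), while B
-- returns 0; seat 0 is genuinely free there, so B's answer is the intended one.
def D_bestSeat (seats : List Int) : Prop :=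
  seats ≠ [] ∧ seats.head? ≠ some 1 ∧ List.IsChain (fun a b => a = 1 ∨ b = 1) seats
instance (seats : List Int) : Decidable (D_bestSeat seats) := by unfold D_bestSeat; infer_instance

def Spec_bestSeat (seats : List Int) (out : Int) : Prop := ¬ D_bestSeat seats → out = bestSeat_alt seats
instance (seats : List Int) (out : Int) : Decidable (Spec_bestSeat seats out) := by unfold Spec_bestSeat; infer_instance

def pvDiffWitness_bestSeat : List Int := [0]
def pvDiffWitnessOut_bestSeat : Int × Int := (-1, 0)

-- ===== CLAIM (what is proved, stated in full; the proofs are below) =====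
def Claim_unchanged_bestSeat : Prop := ∀ (seats : List Int), Dom_bestSeat seats → Spec_bestSeat seats (bestSeat seats)
def Claim_changed_bestSeat : Prop := Dom_bestSeat (pvDiffWitness_bestSeat) ∧ D_bestSeat (pvDiffWitness_bestSeat) ∧ bestSeat (pvDiffWitness_bestSeat) = pvDiffWitnessOut_bestSeat.1 ∧ bestSeat_alt (pvDiffWitness_bestSeat) = pvDiffWitnessOut_bestSeat.2 ∧ pvDiffWitnessOut_bestSeat.1 ≠ pvDiffWitnessOut_bestSeat.2
def Claim_exact_bestSeat : Prop := ∀ (seats : List Int), Dom_bestSeat seats → D_bestSeat seats → bestSeat seats ≠ bestSeat_alt seats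

-- ===== LEMMAS AND PROOFS =====

theorem zeroRuns_nil (i : Nat) : zeroRuns [] i = [] := by
  rw [zeroRuns.eq_def]

theorem zeroRuns_cons (x : Int) (t : List Int) (i : Nat) :
    zeroRuns (x :: t) i =
      if x = 1 then zeroRuns t (i + 1)
      else (i, 1 + (t.takeWhile notOne).length) ::
        zeroRuns (t.drop (t.takeWhile notOne).length) (i + 1 + (t.takeWhile notOne).length) := by
  rw [zeroRuns.eq_def]

-- zeroRuns with the run currently in progress (c pending zeros just before index i) merged into the first run
def runsM (c : Nat) (l : List Int) (i : Nat) : List (Nat × Nat) :=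
  match l with
  | [] => []
  | x :: t =>
    if x = 1 then zeroRuns t (i + 1)
    else (i - c, c + 1 + (t.takeWhile notOne).length) ::
      zeroRuns (t.drop (t.takeWhile notOne).length) (i + 1 + (t.takeWhile notOne).length)

-- A's best-so-far pair (right, mx) folded over a list of runs
def pick (runs : List (Nat × Nat)) (acc : Nat × Nat) : Nat × Nat :=
  runs.foldl (fun a p => if p.2 > a.2 then (p.1 + p.2 - 1, p.2) else a) acc

theorem runsM_zero (l : List Int) (i : Nat) : runsM 0 l i = zeroRuns l i := by
  cases l with
  | nil => rw [runsM, zeroRuns_nil]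
  | cons x t =>
    rw [runsM, zeroRuns_cons]
    simp

theorem runsM_succ (c : Nat) (t : List Int) (i : Nat) :
    runsM (c + 1) t (i + 1) =
      (if (t.takeWhile notOne).length = 0 then
        zeroRuns (t.drop (t.takeWhile notOne).length) (i + 1 + (t.takeWhile notOne).length)
      else
        (i - c, c + 1 + (t.takeWhile notOne).length) ::
          zeroRuns (t.drop (t.takeWhile notOne).length)
            (i + 1 + (t.takeWhile notOne).length)) := by
  cases t with
  | nil => simp [runsM, zeroRuns_nil]
  | cons y t' =>
    by_cases hy : y = 1
    · have hn : notOne y = false := by simp [notOne, hy]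
      have htw0 : ((y :: t').takeWhile notOne) = [] := by simp [hn]
      rw [runsM, if_pos hy, htw0]
      simp only [List.length_nil, List.drop_zero]
      rw [zeroRuns_cons, if_pos hy]
      norm_num
    · have hn : notOne y = true := by simp [notOne, hy]
      have htw : ((y :: t').takeWhile notOne).length = (t'.takeWhile notOne).length + 1 := by
        simp [hn]
      rw [runsM]
      simp only [if_neg hy, htw, List.drop_succ_cons]
      rw [if_neg (by omega)]
      have e1 : i + 1 - (c + 1) = i - c := by omega
      have e2 : c + 1 + 1 + (t'.takeWhile notOne).length
          = c + 1 + ((t'.takeWhile notOne).length + 1) := by omega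
      have e3 : i + 1 + 1 + (t'.takeWhile notOne).length
          = i + 1 + ((t'.takeWhile notOne).length + 1) := by omega
      rw [e1, e2, e3]

-- key invariant: A's loop state projects to a best-so-far fold over the merged runs
theorem key (l : List Int) : ∀ (i r m c : Nat), c ≤ m → c ≤ i →
    (((bestSeatLoop l i (r, m, c)).1, (bestSeatLoop l i (r, m, c)).2.1)
      = pick (runsM c l i) (r, m)) := by
  induction l with
  | nil => intro i r m c hcm hci; simp [bestSeatLoop, runsM, pick]
  | cons x t ih =>
    intro i r m c hcm hci
    by_cases hx : x = 1
    · simp only [bestSeatLoop, runsM, if_pos hx]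
      rw [ih (i + 1) r m 0 (by omega) (by omega), runsM_zero]
    · by_cases hgt : c + 1 > m
      · simp only [bestSeatLoop, if_neg hx, if_pos hgt]
        rw [ih (i + 1) i (c + 1) (c + 1) (le_refl _) (by omega), runsM_succ]
        simp only [runsM, if_neg hx]
        by_cases hk0 : (t.takeWhile notOne).length = 0
        · rw [if_pos hk0, hk0]
          simp only [pick, List.foldl_cons]
          rw [if_pos (by omega : c + 1 + 0 > m)]
          have e : i - c + (c + 1 + 0) - 1 = i := by omega
          rw [e]
        · rw [if_neg hk0]
          simp only [pick, List.foldl_cons]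
          rw [if_pos (by omega : c + 1 + (t.takeWhile notOne).length > c + 1),
            if_pos (by omega : c + 1 + (t.takeWhile notOne).length > m)]
      · simp only [bestSeatLoop, if_neg hx, if_neg hgt]
        rw [ih (i + 1) r m (c + 1) (by omega) (by omega), runsM_succ]
        simp only [runsM, if_neg hx]
        by_cases hk0 : (t.takeWhile notOne).length = 0
        · rw [if_pos hk0, hk0]
          simp only [pick, List.foldl_cons]
          rw [if_neg (by omega : ¬ c + 1 + 0 > m)]
        · rw [if_neg hk0]

-- every run produced by zeroRuns has positive length (induction on a length bound, since zeroRuns jumps run-at-a-time)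
theorem zeroRuns_pos_aux (n : Nat) : ∀ (l : List Int) (i : Nat), l.length ≤ n →
    ∀ p ∈ zeroRuns l i, 1 ≤ p.2 := by
  induction n with
  | zero =>
    intro l i hl p hp
    have : l = [] := List.eq_nil_of_length_eq_zero (by omega)
    subst this; rw [zeroRuns_nil] at hp; simp at hp
  | succ n ih =>
    intro l i hl p hp
    cases l with
    | nil => rw [zeroRuns_nil] at hp; simp at hp
    | cons x t =>
      rw [zeroRuns_cons] at hp
      by_cases hx : x = 1
      · rw [if_pos hx] at hp
        exact ih t (i + 1) (by simp at hl; omega) p hp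
      · rw [if_neg hx] at hp
        rcases List.mem_cons.mp hp with h | h
        · subst h; simp
        · exact ih _ _ (by simp at hl ⊢; omega) p h

theorem zeroRuns_pos (l : List Int) (i : Nat) : ∀ p ∈ zeroRuns l i, 1 ≤ p.2 :=
  zeroRuns_pos_aux l.length l i (le_refl _)

-- every run produced by zeroRuns starts at or after the current index
theorem zeroRuns_start_ge_aux (n : Nat) : ∀ (l : List Int) (i : Nat), l.length ≤ n →
    ∀ p ∈ zeroRuns l i, i ≤ p.1 := by
  induction n with
  | zero =>
    intro l i hl p hp
    have : l = [] := List.eq_nil_of_length_eq_zero (by omega)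
    subst this; rw [zeroRuns_nil] at hp; simp at hp
  | succ n ih =>
    intro l i hl p hp
    cases l with
    | nil => rw [zeroRuns_nil] at hp; simp at hp
    | cons x t =>
      rw [zeroRuns_cons] at hp
      by_cases hx : x = 1
      · rw [if_pos hx] at hp
        have := ih t (i + 1) (by simp at hl; omega) p hp
        omega
      · rw [if_neg hx] at hp
        rcases List.mem_cons.mp hp with h | h
        · subst h; simp
        · have := ih _ _ (by simp at hl ⊢; omega) p h
          omega

-- B's option-accumulator fold agrees with A's pair fold once seeded
theorem pick_fold (rs : List (Nat × Nat)) : ∀ (s n : Nat),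
    pick rs (s + n - 1, n) =
      (match rs.foldl (fun acc p =>
          match acc with
          | none => some p
          | some q => if p.2 > q.2 then some p else acc) (some (s, n)) with
        | none => (0, 0)
        | some (s', n') => (s' + n' - 1, n')) := by
  induction rs with
  | nil => intro s n; simp [pick]
  | cons p rs ih =>
    intro s n
    by_cases h : p.2 > n
    · simp only [pick, List.foldl_cons, h, if_true]
      exact ih p.1 p.2
    · simp only [pick, List.foldl_cons, h, if_false]
      exact ih s n

theorem pick_spec (rs : List (Nat × Nat)) (hall : ∀ p ∈ rs, 1 ≤ p.2) :
    pick rs (0, 0) =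
      (match pickBest rs with
        | none => (0, 0)
        | some (s, n) => (s + n - 1, n)) := by
  cases rs with
  | nil => simp [pick, pickBest]
  | cons p rs =>
    have hp : 1 ≤ p.2 := hall p (by simp)
    simp only [pick, pickBest, List.foldl_cons, if_pos (by omega : p.2 > 0)]
    exact pick_fold rs p.1 p.2

-- the selected run is one of the runs (to get its length ≥ 1)
theorem pickFold_mem (rs : List (Nat × Nat)) : ∀ (q p : Nat × Nat),
    rs.foldl (fun acc p =>
        match acc with
        | none => some p
        | some q => if p.2 > q.2 then some p else acc) (some q) = some p →
      p = q ∨ p ∈ rs := by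
  induction rs with
  | nil => intro q p h; simp at h; exact Or.inl h.symm
  | cons r rs ih =>
    intro q p h
    simp only [List.foldl_cons] at h
    by_cases hr : r.2 > q.2
    · simp only [if_pos hr] at h
      rcases ih r p h with h' | h'
      · exact Or.inr (by simp [h'])
      · exact Or.inr (by simp [h'])
    · simp only [if_neg hr] at h
      rcases ih q p h with h' | h'
      · exact Or.inl h'
      · exact Or.inr (by simp [h'])

theorem pickBest_mem (rs : List (Nat × Nat)) (p : Nat × Nat) (h : pickBest rs = some p) :
    p ∈ rs := by
  cases rs with
  | nil => simp [pickBest] at h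
  | cons r rs =>
    simp only [pickBest, List.foldl_cons] at h
    rcases pickFold_mem rs r p h with h' | h'
    · simp [h']
    · simp [h']

-- the selected run's length dominates the seed and every run
theorem pickFold_max (rs : List (Nat × Nat)) : ∀ (q r : Nat × Nat),
    rs.foldl (fun acc p =>
        match acc with
        | none => some p
        | some q => if p.2 > q.2 then some p else acc) (some q) = some r →
      q.2 ≤ r.2 ∧ ∀ p ∈ rs, p.2 ≤ r.2 := by
  induction rs with
  | nil => intro q r h; simp at h; subst h; exact ⟨le_refl _, by simp⟩
  | cons a rs ih =>
    intro q r h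
    simp only [List.foldl_cons] at h
    by_cases ha : a.2 > q.2
    · simp only [if_pos ha] at h
      obtain ⟨h1, h2⟩ := ih a r h
      refine ⟨by omega, ?_⟩
      intro p hp
      rcases List.mem_cons.mp hp with h' | h'
      · subst h'; exact h1
      · exact h2 p h'
    · simp only [if_neg ha] at h
      obtain ⟨h1, h2⟩ := ih q r h
      refine ⟨h1, ?_⟩
      intro p hp
      rcases List.mem_cons.mp hp with h' | h'
      · subst h'; omega
      · exact h2 p h'

theorem pickBest_max (rs : List (Nat × Nat)) (r : Nat × Nat) (h : pickBest rs = some r) :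
    ∀ p ∈ rs, p.2 ≤ r.2 := by
  cases rs with
  | nil => simp [pickBest] at h
  | cons a rs =>
    simp only [pickBest, List.foldl_cons] at h
    obtain ⟨h1, h2⟩ := pickFold_max rs a r h
    intro p hp
    rcases List.mem_cons.mp hp with h' | h'
    · subst h'; exact h1
    · exact h2 p h'

-- a list with two adjacent empty seats yields a run of length ≥ 2
theorem adj_run (l : List Int) : ∀ (i : Nat),
    ¬ List.IsChain (fun a b => a = 1 ∨ b = 1) l →
    ∃ p ∈ zeroRuns l i, 2 ≤ p.2 := by
  induction l with
  | nil => intro i h; exact absurd List.IsChain.nil h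
  | cons x t ih =>
    intro i h
    cases t with
    | nil => exact absurd (List.IsChain.singleton x) h
    | cons y t' =>
      rw [List.isChain_cons_cons] at h
      push Not at h
      by_cases hx : x = 1
      · have hnc : ¬ List.IsChain (fun a b => a = 1 ∨ b = 1) (y :: t') := by
          intro hc; exact h (Or.inl hx) hc
        obtain ⟨p, hp, hp2⟩ := ih (i + 1) hnc
        rw [zeroRuns_cons, if_pos hx]
        exact ⟨p, hp, hp2⟩
      · by_cases hy : y = 1
        · have hnc : ¬ List.IsChain (fun a b => a = 1 ∨ b = 1) (y :: t') := by
            intro hc; exact h (Or.inr hy) hc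
          obtain ⟨p, hp, hp2⟩ := ih (i + 1) hnc
          have hn : notOne y = false := by simp [notOne, hy]
          have htw0 : ((y :: t').takeWhile notOne) = [] := by simp [hn]
          rw [zeroRuns_cons, if_neg hx, htw0]
          simp only [List.length_nil, List.drop_zero, Nat.add_zero]
          exact ⟨p, List.mem_cons_of_mem _ hp, hp2⟩
        · -- two adjacent empty seats at the front: the first run has length ≥ 2
          have hn : notOne y = true := by simp [notOne, hy]
          rw [zeroRuns_cons, if_neg hx]
          refine ⟨(i, 1 + ((y :: t').takeWhile notOne).length), List.mem_cons_self, ?_⟩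
          simp [hn]
          omega

-- with no two adjacent empty seats every run has length exactly 1
theorem chain_run_one (l : List Int) : ∀ (i : Nat),
    List.IsChain (fun a b => a = 1 ∨ b = 1) l →
    ∀ p ∈ zeroRuns l i, p.2 = 1 := by
  induction l with
  | nil => intro i _ p hp; rw [zeroRuns_nil] at hp; simp at hp
  | cons x t ih =>
    intro i hc p hp
    by_cases hx : x = 1
    · rw [zeroRuns_cons, if_pos hx] at hp
      exact ih (i + 1) hc.tail p hp
    · have htw0 : (t.takeWhile notOne) = [] := by
        cases t with
        | nil => simp
        | cons y t' =>
          have hy : y = 1 := by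
            rcases (List.isChain_cons_cons.mp hc).1 with h | h
            · exact absurd h hx
            · exact h
          simp [notOne, hy]
      rw [zeroRuns_cons, if_neg hx, htw0] at hp
      simp only [List.length_nil, List.drop_zero, Nat.add_zero] at hp
      rcases List.mem_cons.mp hp with h | h
      · subst h; simp
      · exact ih (i + 1) hc.tail p h

-- the fold keeps its seed when no later run is strictly longer
theorem pickFold_keep (rs : List (Nat × Nat)) (q : Nat × Nat)
    (h : ∀ p ∈ rs, ¬ p.2 > q.2) :
    rs.foldl (fun acc p =>
        match acc with
        | none => some p
        | some q => if p.2 > q.2 then some p else acc) (some q) = some q := by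
  induction rs with
  | nil => rfl
  | cons a rs ih =>
    simp only [List.foldl_cons, if_neg (h a (by simp))]
    exact ih (fun p hp => h p (List.mem_cons_of_mem _ hp))

-- inside D_: the first longest run is the single seat at index 0
theorem pickBest_D (x : Int) (t : List Int) (hx : x ≠ 1)
    (hc : List.IsChain (fun a b => a = 1 ∨ b = 1) (x :: t)) :
    pickBest (zeroRuns (x :: t) 0) = some (0, 1) := by
  have htw0 : (t.takeWhile notOne) = [] := by
    cases t with
    | nil => simp
    | cons y t' =>
      have hy : y = 1 := by
        rcases (List.isChain_cons_cons.mp hc).1 with h | h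
        · exact absurd h hx
        · exact h
      simp [notOne, hy]
  rw [zeroRuns_cons, if_neg hx, htw0]
  simp only [List.length_nil, List.drop_zero, Nat.add_zero, Nat.zero_add]
  simp only [pickBest, List.foldl_cons]
  exact pickFold_keep _ _ (by
    intro p hp
    have := chain_run_one t 1 hc.tail p hp
    omega)

-- shared computation: A's result expressed through pickBest
theorem bestSeat_key (seats : List Int) :
    ((bestSeatLoop seats 0 (0, 0, 0)).1, (bestSeatLoop seats 0 (0, 0, 0)).2.1)
      = (match pickBest (zeroRuns seats 0) with
          | none => ((0 : Nat), (0 : Nat))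
          | some (s, n) => (s + n - 1, n)) := by
  have hkey := key seats 0 0 0 0 (le_refl _) (le_refl _)
  rw [runsM_zero, pick_spec (zeroRuns seats 0) (zeroRuns_pos seats 0)] at hkey
  exact hkey

-- ===== VERDICT (by name: the statements are the Claim_ definitions above) =====
theorem bestSeat_spec : Claim_unchanged_bestSeat := by
  intro seats _
  unfold Spec_bestSeat
  intro hnd
  unfold bestSeat bestSeat_alt
  have hkey := bestSeat_key seats
  cases hbest : pickBest (zeroRuns seats 0) with
  | none =>
    rw [hbest] at hkey
    have h1 : (bestSeatLoop seats 0 (0, 0, 0)).1 = 0 := congrArg Prod.fst hkey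
    simp [h1]
  | some p =>
    obtain ⟨s, n⟩ := p
    rw [hbest] at hkey
    have h1 : (bestSeatLoop seats 0 (0, 0, 0)).1 = s + n - 1 := congrArg Prod.fst hkey
    have h2 : (bestSeatLoop seats 0 (0, 0, 0)).2.1 = n := congrArg (fun q => q.2) hkey
    have hmem := pickBest_mem _ _ hbest
    have hn : 1 ≤ n := zeroRuns_pos seats 0 (s, n) hmem
    -- outside D_ the selected run cannot be the single seat at index 0
    have hz : s + n - 1 ≠ 0 := by
      unfold D_bestSeat at hnd
      push Not at hnd
      cases seats with
      | nil => rw [zeroRuns_nil] at hmem; simp at hmem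
      | cons x t =>
        by_cases hx : x = 1
        · -- first seat occupied: every run starts at index ≥ 1
          rw [zeroRuns_cons, if_pos hx] at hmem
          have := zeroRuns_start_ge_aux t.length t 1 (le_refl _) (s, n) hmem
          simp at this; omega
        · have hh : (x :: t).head? ≠ some 1 := by simp [hx]
          have hnc := hnd (by simp) hh
          obtain ⟨p, hp, hp2⟩ := adj_run (x :: t) 0 hnc
          have := pickBest_max _ _ hbest p hp
          omega
    simp only [h1, h2]
    rw [if_neg hz]
    have hfd : PySem.Int.floordiv ((n : Int) - 1) 2 = (((n - 1) / 2 : Nat) : Int) := by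
      have := PySem.Int.floordiv_natCast (n - 1) 2
      have hc : ((n : Int) - 1) = ((n - 1 : Nat) : Int) := by omega
      rw [hc]
      exact_mod_cast this
    rw [hfd]
    omega

theorem bestSeat_changed : Claim_changed_bestSeat := by
  unfold Claim_changed_bestSeat
  refine ⟨by decide, by decide, by decide, ?_, by decide⟩
  show bestSeat_alt [0] = 0
  simp [bestSeat_alt, zeroRuns_cons, zeroRuns_nil, pickBest]

theorem bestSeat_tight : Claim_exact_bestSeat := by
  intro seats _ hd
  obtain ⟨hne, hh, hc⟩ := hd
  cases seats with
  | nil => exact absurd rfl hne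
  | cons x t =>
    have hx : x ≠ 1 := by simpa using hh
    have hpick := pickBest_D x t hx hc
    have hkey := bestSeat_key (x :: t)
    rw [hpick] at hkey
    have h1 : (bestSeatLoop (x :: t) 0 (0, 0, 0)).1 = 0 := by
      have := congrArg Prod.fst hkey; simpa using this
    unfold bestSeat bestSeat_alt
    rw [hpick]
    simp [h1]
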